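-- pv_equiv track=rewrite | github.com/flatironinstitute/fastqToMat0 | fastqTomat0/processor/degenerate_tools.py | convert_pattern
-- ===== SOURCE A (Python) =====
-- import string
--
-- def convert_pattern(pattern):
--     pattern = pattern.upper()
--     pattern_idx = {}
--     for c in string.ascii_uppercase:
--         idx = find_all_char(pattern, c)
--         if len(idx) > 0:
--             pattern_idx[c] = (min(idx), max(idx) + 1)
--     return pattern_idx
--
-- def find_all_char(sstr, character):
--     idx = []
--     for pos, chr in enumerate(sstr):
--         if character == chr:
--             idx.append(pos)
--     return idx
-- ===== SOURCE B (Python) =====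
-- import string
--
--
-- def convert_pattern(pattern):
--     # One scatter pass: per character keep (first index, last index), then
--     # read the table back in alphabetical order.
--     d = {}
--     for pos, ch in enumerate(pattern.upper()):
--         if ch in d:
--             d[ch] = (d[ch][0], pos)
--         else:
--             d[ch] = (pos, pos)
--     return {c: (d[c][0], d[c][1] + 1) for c in string.ascii_uppercase if c in d}
-- ===== Notes on version B (the rewrite author's own statement) =====
-- stated objective: faster
-- what changed: A scans the whole string 26 times (once per uppercase letter, collecting all positions and taking min/max); B makes a single pass that maintains (first,last) index per character in a dict and then reads the table back in alphabetical order.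
import Mathlib
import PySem

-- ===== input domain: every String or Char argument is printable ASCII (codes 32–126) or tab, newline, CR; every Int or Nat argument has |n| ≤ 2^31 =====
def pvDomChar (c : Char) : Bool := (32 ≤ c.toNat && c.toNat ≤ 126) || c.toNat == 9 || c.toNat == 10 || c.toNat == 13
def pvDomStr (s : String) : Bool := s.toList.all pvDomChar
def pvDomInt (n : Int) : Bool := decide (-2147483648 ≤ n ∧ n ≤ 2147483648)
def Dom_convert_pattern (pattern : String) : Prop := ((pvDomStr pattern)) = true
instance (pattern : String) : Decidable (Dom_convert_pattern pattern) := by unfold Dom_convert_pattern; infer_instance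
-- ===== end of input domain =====

-- B replaces A's 26 full-string scans (one per letter, with min/max over all positions) by a single
-- pass maintaining a (first index, last index) table per character, read back in alphabetical order.

-- string.ascii_uppercase, the shared module constant of both Pythons
def pvUppercase : List Char := "ABCDEFGHIJKLMNOPQRSTUVWXYZ".toList

-- ===== PORT A =====
def find_all_char (sstr : List Char) (character : Char) : List Int :=
  (PySem.List.enumerate sstr).foldl
    (fun idx p => if character == p.2 then idx ++ [p.1] else idx) []

def convert_pattern (pattern : String) : List (String × Int × Int) :=
  let p := (PySem.Str.upper pattern).toList
  (pvUppercase.foldl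
    (fun (acc : PySem.Dict String (Int × Int)) c =>
      let idx := find_all_char p c
      if idx.length > 0 then
        acc.insert (String.ofList [c])
          ((PySem.List.min? idx (fun x => x)).getD 0,
           (PySem.List.max? idx (fun x => x)).getD 0 + 1)
      else acc)
    PySem.Dict.empty).items

-- ===== PORT B =====
-- the scatter pass of Source B: d[ch] = (d[ch][0], pos) if ch in d else (pos, pos)
def pvBuildTable (s : List Char) : PySem.Dict Char (Int × Int) :=
  (PySem.List.enumerate s).foldl
    (fun d p =>
      match d.get? p.2 with
      | some v => d.insert p.2 (v.1, p.1)
      | none   => d.insert p.2 (p.1, p.1))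
    PySem.Dict.empty

def convert_pattern_alt (pattern : String) : List (String × Int × Int) :=
  let d := pvBuildTable (PySem.Str.upper pattern).toList
  pvUppercase.foldl
    (fun out c =>
      match d.get? c with
      | some v => out ++ [(String.ofList [c], (v.1, v.2 + 1))]
      | none   => out)
    []

-- ===== PRECONDITION & SPEC =====
def Spec_convert_pattern (pattern : String) (out : List (String × Int × Int)) : Prop := out = convert_pattern_alt pattern
instance (pattern : String) (out : List (String × Int × Int)) : Decidable (Spec_convert_pattern pattern out) := by unfold Spec_convert_pattern; infer_instance

-- ===== CLAIM (what is proved, stated in full; the proofs are below) =====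
def Claim_equal_convert_pattern : Prop := ∀ (pattern : String), Dom_convert_pattern pattern → Spec_convert_pattern pattern (convert_pattern pattern)

-- ===== LEMMAS AND PROOFS =====

lemma find_all_char_append (s : List Char) (a : Char) (c : Char) :
    find_all_char (s ++ [a]) c =
      find_all_char s c ++ (if c == a then [(s.length : Int)] else []) := by
  unfold find_all_char
  rw [PySem.List.enumerate_append, List.foldl_append]
  simp [PySem.List.enumerate_cons, PySem.List.enumerate_nil]
  split <;> simp

lemma pvBuildTable_append (s : List Char) (a : Char) :
    pvBuildTable (s ++ [a]) =
      (match (pvBuildTable s).get? a with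
       | some v => (pvBuildTable s).insert a (v.1, (s.length : Int))
       | none   => (pvBuildTable s).insert a ((s.length : Int), (s.length : Int))) := by
  unfold pvBuildTable
  rw [PySem.List.enumerate_append, List.foldl_append]
  simp [PySem.List.enumerate_cons, PySem.List.enumerate_nil]

-- the table's entry at c is exactly (min, max) of A's occurrence list of c
lemma table_spec (s : List Char) (c : Char) :
    ((pvBuildTable s).get? c = none ∧ find_all_char s c = []) ∨
    (∃ m M, (pvBuildTable s).get? c = some (m, M) ∧ find_all_char s c ≠ [] ∧
      PySem.List.min? (find_all_char s c) (fun x => x) = some m ∧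
      PySem.List.max? (find_all_char s c) (fun x => x) = some M ∧
      M < (s.length : Int)) := by
  induction s using List.reverseRecOn with
  | nil =>
      left
      constructor <;> simp [pvBuildTable, find_all_char, PySem.List.enumerate_nil]
  | append_singleton s a ih =>
      rw [pvBuildTable_append, find_all_char_append]
      by_cases hca : c = a
      · subst hca
        simp only [beq_self_eq_true, if_pos]
        rcases ih with ⟨h1, h2⟩ | ⟨m, M, h1, h2, h3, h4, h5⟩
        · rw [h1, h2]
          right
          refine ⟨(s.length : Int), (s.length : Int), ?_, by simp, ?_, ?_, ?_⟩
          · simp [PySem.Dict.get?_insert_self]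
          · simp [PySem.List.min?_id_cons]
          · simp [PySem.List.max?_id_cons]
          · simp only [List.length_append, List.length_cons, List.length_nil]; push_cast; omega
        · rw [h1]
          right
          obtain ⟨x, t, hxt⟩ := List.exists_cons_of_ne_nil h2
          have hmM : m ≤ M := by
            have hmem := PySem.List.min?_mem h3
            exact PySem.List.max?_isMax h4 m hmem
          have hMn : M < (s.length : Int) := h5
          refine ⟨m, (s.length : Int), ?_, by simp, ?_, ?_, ?_⟩
          · simp [PySem.Dict.get?_insert_self]
          · rw [hxt] at h3 ⊢
            rw [List.cons_append, PySem.List.min?_id_cons] at *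
            rw [List.foldl_append]
            simp only [List.foldl_cons, List.foldl_nil]
            simp only [Option.some.injEq] at h3 ⊢
            rw [h3]
            exact min_eq_left (by omega)
          · rw [hxt] at h4 ⊢
            rw [List.cons_append, PySem.List.max?_id_cons] at *
            rw [List.foldl_append]
            simp only [List.foldl_cons, List.foldl_nil]
            simp only [Option.some.injEq] at h4 ⊢
            rw [h4]
            exact max_eq_right (by omega)
          · simp only [List.length_append, List.length_cons, List.length_nil]; push_cast; omega
      · have hba : (c == a) = false := by simp [hca]
        rw [hba]
        simp only [Bool.false_eq_true, if_false, List.append_nil]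
        have hget : (match (pvBuildTable s).get? a with
             | some v => (pvBuildTable s).insert a (v.1, (s.length : Int))
             | none   => (pvBuildTable s).insert a ((s.length : Int), (s.length : Int))).get? c
             = (pvBuildTable s).get? c := by
          cases (pvBuildTable s).get? a <;> simp [PySem.Dict.get?_insert_of_ne _ _ hca]
        rw [hget]
        rcases ih with ⟨h1, h2⟩ | ⟨m, M, h1, h2, h3, h4, h5⟩
        · left; exact ⟨h1, h2⟩
        · right
          refine ⟨m, M, h1, h2, h3, h4, ?_⟩
          simp only [List.length_append, List.length_cons, List.length_nil]; push_cast; omega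

-- one letter of A's loop performs exactly one step of B's read-back loop (on the items list)
lemma step_items (p : List Char) (acc : PySem.Dict String (Int × Int)) (c : Char)
    (hfresh : acc.contains (String.ofList [c]) = false) :
    (let idx := find_all_char p c
     if idx.length > 0 then
        acc.insert (String.ofList [c])
          ((PySem.List.min? idx (fun x => x)).getD 0,
           (PySem.List.max? idx (fun x => x)).getD 0 + 1)
      else acc).items
    = (match (pvBuildTable p).get? c with
       | some v => acc.items ++ [(String.ofList [c], (v.1, v.2 + 1))]
       | none   => acc.items) := by
  rcases table_spec p c with ⟨h1, h2⟩ | ⟨m, M, h1, h2, h3, h4, _⟩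
  · simp [h1, h2]
  · rw [h1]
    simp only []
    rw [if_pos (List.length_pos_of_ne_nil h2), h3, h4]
    simp [PySem.Dict.items_insert, hfresh]

lemma folds_eq (p : List Char) (l : List Char) :
    ∀ (acc : PySem.Dict String (Int × Int)),
    (l.map (fun c => String.ofList [c])).Nodup →
    (∀ c ∈ l, acc.contains (String.ofList [c]) = false) →
    (l.foldl (fun acc c =>
        let idx := find_all_char p c
        if idx.length > 0 then
          acc.insert (String.ofList [c])
            ((PySem.List.min? idx (fun x => x)).getD 0,
             (PySem.List.max? idx (fun x => x)).getD 0 + 1)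
        else acc) acc).items
    = l.foldl (fun out c =>
        match (pvBuildTable p).get? c with
        | some v => out ++ [(String.ofList [c], (v.1, v.2 + 1))]
        | none   => out) acc.items := by
  induction l with
  | nil => intro acc _ _; rfl
  | cons c t ih =>
    intro acc hnd hfresh
    simp only [List.map_cons, List.nodup_cons] at hnd
    simp only [List.foldl_cons]
    rw [← step_items p acc c (hfresh c (by simp))]
    apply ih
    · exact hnd.2
    · intro c' hc'
      have hne : String.ofList [c'] ≠ String.ofList [c] := by
        intro h
        exact hnd.1 (h ▸ List.mem_map_of_mem hc')
      have hacc := hfresh c' (List.mem_cons_of_mem _ hc')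
      split
      · rw [PySem.Dict.contains_insert]
        simp [hne, hacc]
      · exact hacc

-- ===== VERDICT (by name: the statement is the Claim_ definition above) =====
theorem convert_pattern_spec : Claim_equal_convert_pattern := by
  intro pattern _
  unfold Spec_convert_pattern convert_pattern convert_pattern_alt
  have h := folds_eq (PySem.Str.upper pattern).toList pvUppercase PySem.Dict.empty
    (by decide) (fun c _ => by simp [PySem.Dict.contains_empty])
  simpa using h
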